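-- pv_equiv track=rewrite | github.com/rohinikapoor/organizational-roles | code/plots.py | _assign_labels_colors
-- ===== SOURCE A (Python) =====
-- def _assign_labels_colors(labels, colors):
--     """
--     Takes a list of labels and colors and assigns a unique label to each color. Returns a color_list of length(labels).
--     The colors will loop around if the number of unique labels are more than the number of unique colors
--     :param labels:
--     :param colors:
--     :return: color_list
--     """
--     col_idx = 0
--     label2col = {}
--     col_list = []
--     for i in range(len(labels)):
--         if labels[i] in label2col:
--             col_list.append(label2col[labels[i]])
--         else:
--             col = colors[col_idx % len(colors)]
--             col_idx += 1
--             label2col[labels[i]] = col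
--             col_list.append(col)
--     return col_list
-- ===== SOURCE B (Python) =====
-- def _assign_labels_colors(labels, colors):
--     uniques = list(dict.fromkeys(labels))
--     label2col = {lab: colors[i % len(colors)] for i, lab in enumerate(uniques)}
--     return [label2col[lab] for lab in labels]
-- ===== Notes on version B (the rewrite author's own statement) =====
-- stated objective: simpler
-- what changed: B replaces A's single branching pass with a two-phase decomposition: first deduplicate the labels in first-occurrence order (dict.fromkeys) and build the whole label->color table by enumeration, then map every label through the finished table with no membership branch.
import Mathlib
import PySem

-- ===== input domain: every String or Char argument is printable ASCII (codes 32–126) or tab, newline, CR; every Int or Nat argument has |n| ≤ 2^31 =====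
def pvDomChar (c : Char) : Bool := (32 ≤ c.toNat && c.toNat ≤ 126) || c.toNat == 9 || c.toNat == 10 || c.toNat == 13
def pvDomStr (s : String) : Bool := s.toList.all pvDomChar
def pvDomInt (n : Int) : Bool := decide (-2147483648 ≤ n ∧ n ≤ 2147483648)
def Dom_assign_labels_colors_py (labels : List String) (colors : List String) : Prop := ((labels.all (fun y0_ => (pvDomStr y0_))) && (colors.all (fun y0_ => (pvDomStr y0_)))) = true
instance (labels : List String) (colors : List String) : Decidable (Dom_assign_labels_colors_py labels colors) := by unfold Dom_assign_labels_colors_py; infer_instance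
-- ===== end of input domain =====

-- B splits A's single branching pass into two phases: deduplicate labels in first-occurrence
-- order, build the whole label->color table by enumeration, then map labels through it (simpler decomposition).


-- ===== PORT A =====
-- loop over range(len(labels)); state = (col_idx, label2col, col_list), col_list kept reversed.
-- colors[col_idx % len(colors)] is ported as getD with dummy default "": inside Pre_ (colors ≠ []
-- whenever the branch is reached) the index is in range, so the default is never used — exact there.
def pvGoA (colors : List String) : List String → Nat → PySem.Dict String String → List String → List String
  | [], _, _, acc => acc.reverse
  | l :: rest, colIdx, m, acc =>
    match m.get? l with
    | some c => pvGoA colors rest colIdx m (c :: acc)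
    | none =>
      let c := colors.getD (colIdx % colors.length) ""
      pvGoA colors rest (colIdx + 1) (m.insert l c) (c :: acc)

def assign_labels_colors_py (labels : List String) (colors : List String) : List String :=
  pvGoA colors labels 0 PySem.Dict.empty []

-- ===== PORT B =====
-- Source B: uniques = list(dict.fromkeys(labels)); table comprehension over enumerate(uniques); final map.
def assign_labels_colors_py_alt (labels : List String) (colors : List String) : List String :=
  let uniques := PySem.List.dedup labels
  let label2col : PySem.Dict String String :=
    (PySem.List.enumerate uniques).foldl
      (fun d p => d.insert p.2 (colors.getD (p.1.toNat % colors.length) "")) PySem.Dict.empty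
  labels.map (fun l => label2col.getD l "")

-- ===== PRECONDITION & SPEC =====
-- Pre_ excludes exactly the inputs where the Python A raises ZeroDivisionError:
-- a nonempty label list with an empty color list (B raises there too).
def Pre_assign_labels_colors_py (labels : List String) (colors : List String) : Prop :=
  labels = [] ∨ colors ≠ []
instance (labels : List String) (colors : List String) : Decidable (Pre_assign_labels_colors_py labels colors) := by unfold Pre_assign_labels_colors_py; infer_instance

def pvWitness_assign_labels_colors_py : List String × List String := (["a", "b", "a", "c"], ["r", "g"])

def Spec_assign_labels_colors_py (labels : List String) (colors : List String) (out : List String) : Prop := out = assign_labels_colors_py_alt labels colors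
instance (labels : List String) (colors : List String) (out : List String) : Decidable (Spec_assign_labels_colors_py labels colors out) := by unfold Spec_assign_labels_colors_py; infer_instance

-- ===== CLAIM (what is proved, stated in full; the proofs are below) =====
def Claim_equal_assign_labels_colors_py : Prop := ∀ (labels : List String) (colors : List String), Dom_assign_labels_colors_py labels colors → Pre_assign_labels_colors_py labels colors → Spec_assign_labels_colors_py labels colors (assign_labels_colors_py labels colors)

-- ===== LEMMAS AND PROOFS =====

-- a color by table index
def pvColD (colors : List String) (i : Nat) : String := colors.getD (i % colors.length) ""

-- first-match lookup in an association list (what Dict.get? computes on the items list)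
def pvLk (t : List (String × String)) (l : String) : Option String :=
  (t.find? (fun p => p.1 == l)).map (·.2)

-- middle form of both programs: A's loop carried over a bare association list
def pvRun (colors : List String) : List String → List (String × String) → List String
  | [], _ => []
  | l :: rest, t =>
    match pvLk t l with
    | some c => c :: pvRun colors rest t
    | none => pvColD colors t.length :: pvRun colors rest (t ++ [(l, pvColD colors t.length)])

-- the elements of `rest` not in `seen`, deduplicated, in first-occurrence order
def pvNewU : List String → List String → List String
  | _, [] => []
  | seen, l :: rest => if l ∈ seen then pvNewU seen rest else l :: pvNewU (seen ++ [l]) rest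

-- the table rows for a run of fresh labels starting at color index `start`
def pvPairT (colors : List String) : Nat → List String → List (String × String)
  | _, [] => []
  | start, u :: us => (u, pvColD colors start) :: pvPairT colors (start + 1) us

-- the final table after processing `labels` starting from table `t`
def pvFullT (colors : List String) : List String → List (String × String) → List (String × String)
  | [], t => t
  | l :: rest, t =>
    if (pvLk t l).isSome then pvFullT colors rest t
    else pvFullT colors rest (t ++ [(l, pvColD colors t.length)])

theorem pvGet?_mk (t : List (String × String)) (l : String) :
    PySem.Dict.get? ⟨t⟩ l = pvLk t l := rfl

theorem pvGoA_eq_run (colors : List String) (labels : List String) :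
    ∀ (t : List (String × String)) (acc : List String),
      pvGoA colors labels t.length ⟨t⟩ acc = acc.reverse ++ pvRun colors labels t := by
  induction labels with
  | nil => intro t acc; simp [pvGoA, pvRun]
  | cons l rest ih =>
    intro t acc
    rw [pvGoA, pvRun, pvGet?_mk]
    cases h : pvLk t l with
    | some c => simp [ih t (c :: acc)]
    | none =>
      have hcont : (PySem.Dict.contains (⟨t⟩ : PySem.Dict String String) l) = false := by
        simp only [pvLk, Option.map_eq_none_iff, List.find?_eq_none] at h
        simp only [PySem.Dict.contains, List.any_eq_false]
        exact h
      have hins : (PySem.Dict.insert (⟨t⟩ : PySem.Dict String String) l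
          (colors.getD (t.length % colors.length) "")) = ⟨t ++ [(l, colors.getD (t.length % colors.length) "")]⟩ := by
        simp [PySem.Dict.insert, hcont]
      simp only [hins]
      have hlen : t.length + 1 = (t ++ [(l, colors.getD (t.length % colors.length) "")]).length := by
        simp
      rw [hlen, ih]
      simp [pvColD]

theorem pvLk_fullT_of_some (colors : List String) (labels : List String) :
    ∀ (t : List (String × String)) (l : String) (c : String),
      pvLk t l = some c → pvLk (pvFullT colors labels t) l = some c := by
  induction labels with
  | nil => intro t l c h; simpa [pvFullT] using h
  | cons x rest ih =>
    intro t l c h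
    rw [pvFullT]
    split
    · exact ih t l c h
    · apply ih
      simp only [pvLk] at h ⊢
      rw [List.find?_append]
      rcases ho : List.find? (fun p => p.1 == l) t with _ | p
      · rw [ho] at h; simp at h
      · rw [ho] at h ⊢; simpa [Option.some_or] using h

theorem pvRun_eq_map (colors : List String) (labels : List String) :
    ∀ (t : List (String × String)),
      pvRun colors labels t = labels.map (fun l => (pvLk (pvFullT colors labels t) l).getD "") := by
  induction labels with
  | nil => intro t; simp [pvRun]
  | cons l rest ih =>
    intro t
    rw [pvRun, pvFullT]
    cases h : pvLk t l with
    | some c =>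
      have hl : pvLk (pvFullT colors rest t) l = some c := pvLk_fullT_of_some colors rest t l c h
      simp [ih t, hl]
    | none =>
      set t' := t ++ [(l, pvColD colors t.length)] with ht'
      have hlk : pvLk t' l = some (pvColD colors t.length) := by
        simp only [pvLk, ht', List.find?_append]
        simp only [pvLk, Option.map_eq_none_iff] at h
        simp [h]
      have hl : pvLk (pvFullT colors rest t') l = some (pvColD colors t.length) :=
        pvLk_fullT_of_some colors rest t' l _ hlk
      simp [ih t', hl]

theorem pvFullT_shape (colors : List String) (labels : List String) :
    ∀ (t : List (String × String)),
      pvFullT colors labels t = t ++ pvPairT colors t.length (pvNewU (t.map Prod.fst) labels) := by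
  induction labels with
  | nil => intro t; simp [pvFullT, pvNewU, pvPairT]
  | cons l rest ih =>
    intro t
    rw [pvFullT, pvNewU]
    have hmem : (pvLk t l).isSome = true ↔ l ∈ t.map Prod.fst := by
      simp only [pvLk, Option.isSome_map, List.find?_isSome, List.mem_map]
      constructor
      · rintro ⟨p, hp, he⟩; exact ⟨p, hp, by simpa using he⟩
      · rintro ⟨p, hp, he⟩; exact ⟨p, hp, by simp [he]⟩
    by_cases hin : l ∈ t.map Prod.fst
    · rw [if_pos (hmem.mpr hin), if_pos hin, ih]
    · rw [if_neg (by simp [hmem, hin]), if_neg hin, ih]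
      have : (t ++ [(l, pvColD colors t.length)]).map Prod.fst = t.map Prod.fst ++ [l] := by simp
      rw [this]
      rw [pvPairT]
      simp
  
theorem pvSet_foldl_add (labels : List String) :
    ∀ (s : List String), List.foldl PySem.Set.add s labels = s ++ pvNewU s labels := by
  induction labels with
  | nil => intro s; simp [pvNewU]
  | cons l rest ih =>
    intro s
    rw [List.foldl_cons, pvNewU]
    by_cases hin : l ∈ s
    · have : PySem.Set.add s l = s := by simp [PySem.Set.add, PySem.Set.contains, hin]
      rw [this, if_pos hin, ih]
    · have : PySem.Set.add s l = s ++ [l] := by simp [PySem.Set.add, PySem.Set.contains, hin]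
      rw [this, if_neg hin, ih]
      simp

theorem pvBTable (colors : List String) (us : List String) :
    ∀ (start : Nat) (d : PySem.Dict String String),
      (∀ u ∈ us, d.contains u = false) → us.Nodup →
      (List.foldl (fun d p => d.insert p.2 (colors.getD (p.1.toNat % colors.length) "")) d
          (PySem.List.enumerate us (start : Int))).items
        = d.items ++ pvPairT colors start us := by
  induction us with
  | nil => intro start d _ _; simp [PySem.List.enumerate, pvPairT]
  | cons u us ih =>
    intro start d hfresh hnd
    have hcons : PySem.List.enumerate (u :: us) (start : Int)
        = ((start : Int), u) :: PySem.List.enumerate us ((start : Int) + 1) := rfl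
    rw [hcons, List.foldl_cons]
    have htoNat : ((start : Int)).toNat = start := rfl
    have hins : d.insert u (colors.getD (((start : Int)).toNat % colors.length) "")
        = ⟨d.items ++ [(u, pvColD colors start)]⟩ := by
      have hc : d.contains u = false := hfresh u (by simp)
      simp [PySem.Dict.insert, hc, htoNat, pvColD]
    rw [hins]
    have hcast : ((start : Int) + 1) = ((start + 1 : Nat) : Int) := by push_cast; ring
    rw [hcast, ih (start + 1) _ ?_ (by simpa using hnd.of_cons)]
    · rw [pvPairT]; simp
    · intro v hv
      have hne : v ≠ u := by
        rintro rfl; exact (List.nodup_cons.mp hnd).1 hv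
      have h1 : d.contains v = false := hfresh v (by simp [hv])
      simp only [PySem.Dict.contains, List.any_append, List.any_cons, List.any_nil] at h1 ⊢
      simp [h1, Ne.symm hne]

theorem pvAlt_eq_map (labels colors : List String) :
    assign_labels_colors_py_alt labels colors
      = labels.map (fun l => (pvLk (pvPairT colors 0 (pvNewU [] labels)) l).getD "") := by
  unfold assign_labels_colors_py_alt
  have hded : PySem.List.dedup labels = pvNewU [] labels := by
    have := pvSet_foldl_add labels []
    simpa [PySem.List.dedup, PySem.Set.ofList, PySem.Set.empty] using this
  have hnd : (PySem.List.dedup labels).Nodup := PySem.List.nodup_dedup labels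
  have htab := pvBTable colors (PySem.List.dedup labels) 0 PySem.Dict.empty
      (by intro u _; rfl) hnd
  simp only [Nat.cast_zero] at htab
  have hdict : ((PySem.List.enumerate (PySem.List.dedup labels) (0 : Int)).foldl
      (fun d p => d.insert p.2 (colors.getD (p.1.toNat % colors.length) "")) PySem.Dict.empty)
      = (⟨pvPairT colors 0 (pvNewU [] labels)⟩ : PySem.Dict String String) := by
    apply PySem.Dict.ext
    rw [← hded]
    simpa using htab
  simp only [hdict]
  rfl

-- ===== VERDICT (by name: the statement is the Claim_ definition above) =====
theorem assign_labels_colors_py_spec : Claim_equal_assign_labels_colors_py := by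
  intro labels colors _ _
  unfold Spec_assign_labels_colors_py assign_labels_colors_py
  have hA := pvGoA_eq_run colors labels [] []
  simp only [List.length_nil, List.reverse_nil, List.nil_append] at hA
  rw [show (PySem.Dict.empty : PySem.Dict String String) = ⟨[]⟩ from rfl]
  rw [hA, pvRun_eq_map, pvFullT_shape, pvAlt_eq_map]
  rfl
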